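-- pv_equiv track=rewrite | github.com/Haneull-dv/stock-option-app | processors/pdf_name_extractor.py | match_name_to_applicants
-- ===== SOURCE A (Python) =====
-- def match_name_to_applicants(extracted_name, applicant_names):
--     """
--     추출한 이름을 신청자 명단과 매칭
--
--     Args:
--         extracted_name: PDF에서 추출한 이름
--         applicant_names: {id: name} 딕셔너리
--
--     Returns:
--         (applicant_id, applicant_name) 또는 (None, None)
--     """
--     if not extracted_name:
--         return None, None
--
--     # 완전 일치 우선
--     for aid, name in applicant_names.items():
--         if name == extracted_name:
--             return aid, name
--
--     # 부분 일치 (성만 같거나, 이름만 같은 경우)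
--     for aid, name in applicant_names.items():
--         if extracted_name in name or name in extracted_name:
--             return aid, name
--
--     return None, None
-- ===== SOURCE B (Python) =====
-- def match_name_to_applicants(extracted_name, applicant_names):
--     """Single pass: exact match returns immediately; the first partial match is
--     remembered as a fallback candidate and returned only if no exact match exists."""
--     if not extracted_name:
--         return None, None
--     candidate = None
--     for aid, name in applicant_names.items():
--         if name == extracted_name:
--             return aid, name
--         if candidate is None and (extracted_name in name or name in extracted_name):
--             candidate = (aid, name)
--     return candidate if candidate is not None else (None, None)
-- ===== Notes on version B (the rewrite author's own statement) =====
-- stated objective: simpler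
-- what changed: The two separate scans of the dict (exact-match pass, then substring pass) are fused into one pass that returns on an exact match and remembers the first substring match as a fallback candidate.
import Mathlib
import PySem

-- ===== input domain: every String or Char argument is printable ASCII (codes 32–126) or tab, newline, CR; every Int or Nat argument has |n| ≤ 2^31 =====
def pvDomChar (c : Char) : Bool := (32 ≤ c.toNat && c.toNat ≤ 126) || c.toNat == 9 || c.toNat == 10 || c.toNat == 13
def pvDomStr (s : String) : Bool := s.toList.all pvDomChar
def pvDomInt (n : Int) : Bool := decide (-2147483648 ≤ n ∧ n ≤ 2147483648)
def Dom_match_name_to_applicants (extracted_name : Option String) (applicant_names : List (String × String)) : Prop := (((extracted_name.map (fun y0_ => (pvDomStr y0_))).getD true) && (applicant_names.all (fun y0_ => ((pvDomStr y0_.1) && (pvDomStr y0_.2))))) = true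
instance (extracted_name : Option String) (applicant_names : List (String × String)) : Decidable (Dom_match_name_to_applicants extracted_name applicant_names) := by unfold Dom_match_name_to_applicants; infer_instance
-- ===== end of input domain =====

-- B fuses A's two dict scans (exact-match pass, then substring pass) into one pass with a fallback candidate; objective: simpler.


-- ===== PORT A =====
-- first loop of A: first entry with name == extracted_name
def mnaExact : List (String × String) → String → Option (String × String)
  | [], _ => none
  | (aid, name) :: rest, en => if name = en then some (aid, name) else mnaExact rest en

-- second loop of A: first entry with extracted_name in name or name in extracted_name
def mnaSub : List (String × String) → String → Option (String × String)
  | [], _ => none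
  | (aid, name) :: rest, en =>
    if PySem.Str.isIn en name || PySem.Str.isIn name en then some (aid, name)
    else mnaSub rest en

def match_name_to_applicants (extracted_name : Option String) (applicant_names : List (String × String)) : Option String × Option String :=
  match extracted_name with
  | none => (none, none)          -- `if not extracted_name` is true for None …
  | some en =>
    if en = "" then (none, none)  -- … and for the empty string
    else
      match mnaExact applicant_names en with
      | some (aid, name) => (some aid, some name)
      | none =>
        match mnaSub applicant_names en with
        | some (aid, name) => (some aid, some name)
        | none => (none, none)

-- ===== PORT B =====
-- B's single loop: return on exact match, remember the first substring match as candidate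
def mnaScan : List (String × String) → String → Option (String × String) → Option String × Option String
  | [], _, cand =>
    match cand with
    | some (aid, name) => (some aid, some name)
    | none => (none, none)
  | (aid, name) :: rest, en, cand =>
    if name = en then (some aid, some name)
    else
      mnaScan rest en
        (if cand.isNone && (PySem.Str.isIn en name || PySem.Str.isIn name en)
         then some (aid, name) else cand)

def match_name_to_applicants_alt (extracted_name : Option String) (applicant_names : List (String × String)) : Option String × Option String :=
  match extracted_name with
  | none => (none, none)
  | some en =>
    if en = "" then (none, none)
    else mnaScan applicant_names en none

-- ===== PRECONDITION & SPEC =====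
def Spec_match_name_to_applicants (extracted_name : Option String) (applicant_names : List (String × String)) (out : Option String × Option String) : Prop := out = match_name_to_applicants_alt extracted_name applicant_names
instance (extracted_name : Option String) (applicant_names : List (String × String)) (out : Option String × Option String) : Decidable (Spec_match_name_to_applicants extracted_name applicant_names out) := by unfold Spec_match_name_to_applicants; infer_instance

-- ===== CLAIM (what is proved, stated in full; the proofs are below) =====
def Claim_equal_match_name_to_applicants : Prop := ∀ (extracted_name : Option String) (applicant_names : List (String × String)), Dom_match_name_to_applicants extracted_name applicant_names → Spec_match_name_to_applicants extracted_name applicant_names (match_name_to_applicants extracted_name applicant_names)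

-- ===== LEMMAS AND PROOFS =====
-- B's loop, started with candidate `cand`, computes: the first exact match if any,
-- else the pending candidate, else the first substring match.
lemma mnaScan_eq (l : List (String × String)) (en : String) (cand : Option (String × String)) :
    mnaScan l en cand =
      match mnaExact l en with
      | some p => (some p.1, some p.2)
      | none =>
        match cand with
        | some p => (some p.1, some p.2)
        | none =>
          match mnaSub l en with
          | some p => (some p.1, some p.2)
          | none => (none, none) := by
  induction l generalizing cand with
  | nil => cases cand <;> simp [mnaScan, mnaExact, mnaSub]
  | cons hd tl ih =>
    obtain ⟨aid, name⟩ := hd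
    by_cases hx : name = en
    · simp [mnaScan, mnaExact, hx]
    · cases cand with
      | some p =>
        simp [mnaScan, mnaExact, hx, ih]
      | none =>
        by_cases hs : (PySem.Chars.isIn en.toList name.toList = true ∨ PySem.Chars.isIn name.toList en.toList = true)
        · simp [mnaScan, mnaExact, mnaSub, hx, hs, ih]
        · simp [mnaScan, mnaExact, mnaSub, hx, hs, ih]

-- ===== VERDICT (by name: the statement is the Claim_ definition above) =====
theorem match_name_to_applicants_spec : Claim_equal_match_name_to_applicants := by
  intro en l _
  unfold Spec_match_name_to_applicants match_name_to_applicants match_name_to_applicants_alt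
  cases en with
  | none => rfl
  | some s =>
    by_cases h : s = ""
    · simp [h]
    · simp only [h, if_false, mnaScan_eq]
      cases hx : mnaExact l s with
      | some p => obtain ⟨a, n⟩ := p; rfl
      | none =>
        cases hs : mnaSub l s with
        | some p => obtain ⟨a, n⟩ := p; rfl
        | none => rfl
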